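-- pv_equiv track=rewrite | github.com/QuipNetwork/quip-protocol | tutte/graphs/treewidth.py | _child_connectivity_key
-- ===== SOURCE A (Python) =====
-- from typing import Dict, List, Optional, Set, Tuple
--
-- def _child_connectivity_key(child_enc: int, n_shared: int) -> Tuple[Tuple[int, int], ...]:
--     """Extract which shared vertices are in the same block (connectivity pattern).
--
--     Returns tuple of (i,j) pairs where child_part[i] == child_part[j].
--     For n_shared vertices, there are at most Bell(n_shared) unique patterns.
--     """
--     pairs = []
--     for i in range(n_shared):
--         li = (child_enc >> (4 + i * 4)) & 0xF
--         for j in range(i + 1, n_shared):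
--             lj = (child_enc >> (4 + j * 4)) & 0xF
--             if li == lj:
--                 pairs.append((i, j))
--     return tuple(pairs)
-- ===== SOURCE B (Python) =====
-- def _child_connectivity_key(child_enc, n_shared):
--     """Bucket vertex indices by their 4-bit label, emit each bucket's index
--     pairs, then sort the collected pairs lexicographically."""
--     def label(i):
--         return (child_enc >> (4 + i * 4)) & 0xF
--     pairs = []
--     for v in range(16):
--         idxs = [i for i in range(n_shared) if label(i) == v]
--         for k in range(len(idxs)):
--             for j in idxs[k + 1:]:
--                 pairs.append((idxs[k], j))
--     return tuple(sorted(pairs))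
-- ===== Notes on version B (the rewrite author's own statement) =====
-- stated objective: alternative
-- what changed: Replaces the all-pairs label comparison with bucketing indices by their 4-bit label (16 possible values), emitting pairs bucket by bucket and sorting the result back into lexicographic order.
import Mathlib
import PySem

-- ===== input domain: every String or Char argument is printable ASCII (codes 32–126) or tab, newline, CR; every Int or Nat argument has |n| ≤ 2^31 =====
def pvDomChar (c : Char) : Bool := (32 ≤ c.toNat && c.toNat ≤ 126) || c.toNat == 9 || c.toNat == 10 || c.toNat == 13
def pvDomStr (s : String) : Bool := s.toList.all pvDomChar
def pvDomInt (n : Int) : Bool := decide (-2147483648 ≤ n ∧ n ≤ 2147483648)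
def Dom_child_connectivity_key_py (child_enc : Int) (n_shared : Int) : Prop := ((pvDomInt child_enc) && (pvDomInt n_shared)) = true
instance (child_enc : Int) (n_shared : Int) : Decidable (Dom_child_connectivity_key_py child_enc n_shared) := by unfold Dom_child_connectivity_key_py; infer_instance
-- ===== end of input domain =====

-- B replaces A's all-pairs label comparison by bucketing indices over the 16 possible
-- 4-bit labels, emitting each bucket's pairs and sorting them back into lexicographic
-- order; same return value, a different decomposition (no speed claim).


-- ===== PORT A =====
def child_connectivity_key_py (child_enc : Int) (n_shared : Int) : List (Int × Int) :=
  (PySem.List.pyRange 0 n_shared 1).foldl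
    (fun pairs i =>
      let li := PySem.Int.band (child_enc >>> (4 + i * 4).toNat) 15
      (PySem.List.pyRange (i + 1) n_shared 1).foldl
        (fun pairs j =>
          let lj := PySem.Int.band (child_enc >>> (4 + j * 4).toNat) 15
          if li == lj then pairs ++ [(i, j)] else pairs)
        pairs)
    []

-- ===== PORT B =====
-- label(i) from Source B
def pvLabel (child_enc : Int) (i : Int) : Int :=
  PySem.Int.band (child_enc >>> (4 + i * 4).toNat) 15

-- the two inner loops of Source B over a bucket: for k …: for j in idxs[k+1:] …
def pvCombs : List Int → List (Int × Int)
  | [] => []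
  | i :: rest => rest.map (fun j => (i, j)) ++ pvCombs rest

def child_connectivity_key_py_alt (child_enc : Int) (n_shared : Int) : List (Int × Int) :=
  let pairs := (PySem.List.pyRange 0 16 1).foldl
    (fun acc v =>
      let idxs := (PySem.List.pyRange 0 n_shared 1).filter
        (fun i => pvLabel child_enc i == v)
      acc ++ pvCombs idxs)
    []
  PySem.List.sorted2 pairs (fun p => p.1) (fun p => p.2) false

-- ===== PRECONDITION & SPEC =====
def Spec_child_connectivity_key_py (child_enc : Int) (n_shared : Int) (out : List (Int × Int)) : Prop := out = child_connectivity_key_py_alt child_enc n_shared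
instance (child_enc : Int) (n_shared : Int) (out : List (Int × Int)) : Decidable (Spec_child_connectivity_key_py child_enc n_shared out) := by unfold Spec_child_connectivity_key_py; infer_instance

-- ===== CLAIM (what is proved, stated in full; the proofs are below) =====
def Claim_equal_child_connectivity_key_py : Prop := ∀ (child_enc : Int) (n_shared : Int), Dom_child_connectivity_key_py child_enc n_shared → Spec_child_connectivity_key_py child_enc n_shared (child_connectivity_key_py child_enc n_shared)

-- ===== LEMMAS AND PROOFS =====

-- Python's lexicographic order on int pairs
def pvRlex (p q : Int × Int) : Prop := p.1 < q.1 ∨ (p.1 = q.1 ∧ p.2 < q.2)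

-- A as a flatMap of filtered ranges
def pvF (c n : Int) : List (Int × Int) :=
  (PySem.List.pyRange 0 n 1).flatMap (fun i =>
    ((PySem.List.pyRange (i + 1) n 1).filter (fun j => pvLabel c i == pvLabel c j)).map
      (fun j => (i, j)))

-- B's unsorted pair list as a flatMap over the 16 buckets
def pvG (c n : Int) : List (Int × Int) :=
  (PySem.List.pyRange 0 16 1).flatMap (fun v =>
    pvCombs ((PySem.List.pyRange 0 n 1).filter (fun i => pvLabel c i == v)))

theorem pvA_eq_F (c n : Int) : child_connectivity_key_py c n = pvF c n := by
  unfold child_connectivity_key_py pvF pvLabel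
  simp only [PySem.List.foldl_append_if, PySem.List.foldl_append_eq_flatMap, List.nil_append,
    Int.shiftRight_natCast_right]

theorem pvB_eq_sorted_G (c n : Int) :
    child_connectivity_key_py_alt c n =
      PySem.List.sorted2 (pvG c n) (fun p => p.1) (fun p => p.2) false := by
  unfold child_connectivity_key_py_alt pvG
  simp only [PySem.List.foldl_append_eq_flatMap, List.nil_append]

theorem pvLabel_bounds (c i : Int) : 0 ≤ pvLabel c i ∧ pvLabel c i < 16 := by
  unfold pvLabel PySem.Int.band
  split_ifs with h1 h2 h2 <;> [skip; omega; skip; omega]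
  · have := Nat.and_le_right (n := (c >>> (4 + i * 4).toNat).toNat) (m := (15:Int).toNat)
    omega
  · have := Nat.and_le_left (n := (15:Int).toNat) (m := (-(c >>> (4 + i * 4).toNat) - 1).toNat)
    omega

theorem pvCombs_fst_mem {l : List Int} {p : Int × Int} (h : p ∈ pvCombs l) : p.1 ∈ l := by
  induction l with
  | nil => simp [pvCombs] at h
  | cons i rest ih =>
    simp only [pvCombs, List.mem_append, List.mem_map] at h
    rcases h with ⟨j, hj, rfl⟩ | h
    · simp
    · exact List.mem_cons_of_mem _ (ih h)

theorem mem_pvCombs {l : List Int} (hs : l.Pairwise (· < ·)) {p : Int × Int} :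
    p ∈ pvCombs l ↔ p.1 ∈ l ∧ p.2 ∈ l ∧ p.1 < p.2 := by
  induction l with
  | nil => simp [pvCombs]
  | cons i rest ih =>
    rcases List.pairwise_cons.1 hs with ⟨hi, hrest⟩
    simp only [pvCombs, List.mem_append, List.mem_map, List.mem_cons, ih hrest]
    constructor
    · rintro (⟨j, hj, rfl⟩ | ⟨h1, h2, h3⟩)
      · exact ⟨Or.inl rfl, Or.inr hj, hi j hj⟩
      · exact ⟨Or.inr h1, Or.inr h2, h3⟩
    · rintro ⟨h1 | h1, h2 | h2, h3⟩
      · omega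
      · rcases p with ⟨a, b⟩; exact Or.inl ⟨b, h2, by simp_all⟩
      · have := hi _ h1; omega
      · exact Or.inr ⟨h1, h2, h3⟩

theorem pairwise_pvCombs {l : List Int} (hs : l.Pairwise (· < ·)) :
    (pvCombs l).Pairwise pvRlex := by
  induction l with
  | nil => simp [pvCombs]
  | cons i rest ih =>
    rcases List.pairwise_cons.1 hs with ⟨hi, hrest⟩
    rw [pvCombs, List.pairwise_append]
    refine ⟨?_, ih hrest, ?_⟩
    · rw [List.pairwise_map]
      exact hrest.imp (fun {a b} hab => Or.inr ⟨rfl, hab⟩)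
    · intro x hx y hy
      rcases List.mem_map.1 hx with ⟨j, hj, rfl⟩
      exact Or.inl (hi _ (pvCombs_fst_mem hy))

theorem pairwise_F (c n : Int) : (pvF c n).Pairwise pvRlex := by
  unfold pvF
  rw [List.pairwise_flatMap]
  refine ⟨fun i _ => ?_, ?_⟩
  · rw [List.pairwise_map]
    exact ((PySem.List.pairwise_lt_pyRange_one (i + 1) n).filter _).imp
      (fun {a b} h => Or.inr ⟨rfl, h⟩)
  · refine (PySem.List.pairwise_lt_pyRange_one 0 n).imp ?_
    intro i1 i2 h x hx y hy
    rcases List.mem_map.1 hx with ⟨j, _, rfl⟩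
    rcases List.mem_map.1 hy with ⟨k, _, rfl⟩
    exact Or.inl h

theorem mem_F (c n : Int) (p : Int × Int) :
    p ∈ pvF c n ↔ 0 ≤ p.1 ∧ p.1 < p.2 ∧ p.2 < n ∧ pvLabel c p.1 = pvLabel c p.2 := by
  unfold pvF
  simp only [List.mem_flatMap, List.mem_map, List.mem_filter, PySem.List.mem_pyRange_one,
    beq_iff_eq]
  constructor
  · rintro ⟨i, ⟨h0, hin⟩, j, ⟨⟨hj1, hj2⟩, heq⟩, rfl⟩
    exact ⟨h0, by omega, hj2, heq⟩
  · rintro ⟨h0, hlt, hn, heq⟩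
    exact ⟨p.1, ⟨h0, by omega⟩, p.2, ⟨⟨by omega, hn⟩, heq⟩, rfl⟩

theorem mem_G (c n : Int) (p : Int × Int) :
    p ∈ pvG c n ↔ 0 ≤ p.1 ∧ p.1 < p.2 ∧ p.2 < n ∧ pvLabel c p.1 = pvLabel c p.2 := by
  unfold pvG
  simp only [List.mem_flatMap, PySem.List.mem_pyRange_one]
  constructor
  · rintro ⟨v, ⟨hv0, hv16⟩, hp⟩
    rw [mem_pvCombs ((PySem.List.pairwise_lt_pyRange_one 0 n).filter _)] at hp
    rcases hp with ⟨h1, h2, h3⟩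
    simp only [List.mem_filter, PySem.List.mem_pyRange_one, beq_iff_eq] at h1 h2
    exact ⟨h1.1.1, h3, h2.1.2, by rw [h1.2, h2.2]⟩
  · rintro ⟨h0, hlt, hn, heq⟩
    refine ⟨pvLabel c p.1, ⟨(pvLabel_bounds c p.1).1, (pvLabel_bounds c p.1).2⟩, ?_⟩
    rw [mem_pvCombs ((PySem.List.pairwise_lt_pyRange_one 0 n).filter _)]
    simp only [List.mem_filter, PySem.List.mem_pyRange_one, beq_iff_eq]
    exact ⟨⟨⟨h0, by omega⟩, trivial⟩, ⟨⟨by omega, hn⟩, heq.symm⟩, hlt⟩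

theorem pvRlex_ne {a b : Int × Int} (h : pvRlex a b) : a ≠ b := by
  rcases h with h | ⟨h1, h2⟩ <;> (intro hab; subst hab; omega)

theorem nodup_F (c n : Int) : (pvF c n).Nodup :=
  (pairwise_F c n).imp (fun {_ _} h => pvRlex_ne h)

theorem nodup_G (c n : Int) : (pvG c n).Nodup := by
  unfold pvG
  show (List.flatMap _ _).Pairwise _
  rw [List.pairwise_flatMap]
  refine ⟨fun v _ => ?_, ?_⟩
  · exact (pairwise_pvCombs ((PySem.List.pairwise_lt_pyRange_one 0 n).filter _)).imp
      (fun {_ _} h => pvRlex_ne h)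
  · refine (PySem.List.pairwise_lt_pyRange_one 0 16).imp ?_
    intro v1 v2 h x hx y hy hxy
    subst hxy
    have h1 := (List.mem_filter.1 (pvCombs_fst_mem hx)).2
    have h2 := (List.mem_filter.1 (pvCombs_fst_mem hy)).2
    rw [beq_iff_eq] at h1 h2
    omega

theorem perm_F_G (c n : Int) : (pvF c n).Perm (pvG c n) :=
  (List.perm_ext_iff_of_nodup (nodup_F c n) (nodup_G c n)).2
    (fun p => (mem_F c n p).trans (mem_G c n p).symm)

theorem pvSorted2_eq (xs ys : List (Int × Int)) (hperm : ys.Perm xs)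
    (hpw : ys.Pairwise pvRlex) :
    PySem.List.sorted2 xs (fun p => p.1) (fun p => p.2) false = ys := by
  have hkey : PySem.List.sorted2 xs (fun p => p.1) (fun p => p.2) false
      = PySem.List.sorted xs (fun p => (toLex p : Lex (Int × Int))) false := by
    have hfun : (fun (a b : Int × Int) => decide (a.1 < b.1) || !decide (b.1 < a.1) && decide (a.2 < b.2))
        = fun (a b : Int × Int) => decide ((toLex a : Lex (Int × Int)) < toLex b) := by
      funext a b
      by_cases h1 : a.1 < b.1
      · simp [Prod.Lex.lt_iff, h1]
      · by_cases h2 : b.1 < a.1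
        · simp only [Prod.Lex.lt_iff]
          simp [h1, h2]
          omega
        · have he : a.1 = b.1 := le_antisymm (not_lt.1 h2) (not_lt.1 h1)
          simp [Prod.Lex.lt_iff, he]
    unfold PySem.List.sorted2 PySem.List.sorted
    show List.foldl (fun acc x => PySem.List.insertBy (fun (a b : Int × Int) =>
        decide (a.1 < b.1) || !decide (b.1 < a.1) && decide (a.2 < b.2)) x acc) [] xs
      = List.foldl (fun acc x => PySem.List.insertBy (fun (a b : Int × Int) =>
        decide ((toLex a : Lex (Int × Int)) < toLex b)) x acc) [] xs
    rw [hfun]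
  rw [hkey]
  refine PySem.List.sorted_eq_of_perm_of_pairwise_lt xs ys _ hperm ?_
  refine hpw.imp (fun {a b} hab => ?_)
  rw [Prod.Lex.lt_iff]
  exact hab

-- ===== VERDICT (by name: the statement is the Claim_ definition above) =====
theorem child_connectivity_key_py_spec : Claim_equal_child_connectivity_key_py := by
  intro c n _
  unfold Spec_child_connectivity_key_py
  rw [pvA_eq_F, pvB_eq_sorted_G,
    pvSorted2_eq (pvG c n) (pvF c n) (perm_F_G c n) (pairwise_F c n)]
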